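-- pv_equiv track=rewrite | github.com/SwastikMajumder/chemistry_ai | chemistry.py | is_tree_with_max_4_children
-- ===== SOURCE A (Python) =====
-- from collections import defaultdict, deque
--
-- def is_connected(edge_list):
--     if not edge_list:
--         return True
--
--     graph = defaultdict(list)
--     nodes = set()
--
--     for u, v in edge_list:
--         graph[u].append(v)
--         graph[v].append(u)
--         nodes.add(u)
--         nodes.add(v)
--
--     start_node = next(iter(nodes))
--     visited = set()
--
--     def bfs(node):
--         queue = deque([node])
--         visited.add(node)
--
--         while queue:
--             current = queue.popleft()
--             for neighbor in graph[current]: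
--                 if neighbor not in visited:
--                     visited.add(neighbor)
--                     queue.append(neighbor)
--
--     bfs(start_node)
--
--     return len(visited) == len(nodes)
--
-- def has_cycle(graph, node, visited, parent):
--     visited.add(node)
--     for neighbor in graph[node]:
--         if neighbor not in visited:
--             if has_cycle(graph, neighbor, visited, node):
--                 return True
--         elif parent is not None and neighbor != parent:
--             return True
--     return False
--
-- def is_tree_with_max_4_children(edge_list):
--     if not edge_list:
--         return False  # An empty edge list cannot represent a tree.
--
--     graph = defaultdict(list)
--     nodes = set()
--
--     for u, v in edge_list:
--         graph[u].append(v)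
--         graph[v].append(u)
--         nodes.add(u)
--         nodes.add(v)
--     if len(nodes) != 7:
--         return False
--     # Check connectivity
--     if not is_connected(edge_list):
--         return False
--
--     # Check for cycles
--     visited = set()
--     start_node = next(iter(nodes))
--     if has_cycle(graph, start_node, visited, None):
--         return False
--
--     # Check the number of edges
--     if len(edge_list) != len(nodes) - 1:
--         return False
--
--     # Check for maximum 4 children per node
--     for node in graph:
--         if len(graph[node]) > 4:
--             return False
--
--     return True
-- ===== SOURCE B (Python) =====
-- def is_tree_with_max_4_children(edge_list):
--     # A tree on 7 nodes must have exactly 6 edges; with that fixed, connectivity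
--     # on 7 distinct nodes already implies acyclicity, so no cycle check is needed.
--     if len(edge_list) != 6:
--         return False
--     deg = {}
--     for u, v in edge_list:
--         deg[u] = deg.get(u, 0) + 1
--         deg[v] = deg.get(v, 0) + 1
--     if len(deg) != 7:
--         return False
--     if any(d > 4 for d in deg.values()):
--         return False
--     reached = {edge_list[0][0]}
--     for _ in range(6):
--         for u, v in edge_list:
--             if u in reached or v in reached:
--                 reached.add(u)
--                 reached.add(v)
--     return len(reached) == 7
-- ===== Notes on version B (the rewrite author's own statement) =====
-- stated objective: simpler
-- what changed: B replaces A's adjacency-dict build, BFS-queue connectivity pass and recursive parent-tracking DFS cycle check by an early edge-count test, a single degree counter, and a fixed-round edge-relaxation closure for connectivity; no cycle check is needed because 6 edges on 7 distinct nodes plus connectivity already implies acyclicity.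
import Mathlib
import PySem

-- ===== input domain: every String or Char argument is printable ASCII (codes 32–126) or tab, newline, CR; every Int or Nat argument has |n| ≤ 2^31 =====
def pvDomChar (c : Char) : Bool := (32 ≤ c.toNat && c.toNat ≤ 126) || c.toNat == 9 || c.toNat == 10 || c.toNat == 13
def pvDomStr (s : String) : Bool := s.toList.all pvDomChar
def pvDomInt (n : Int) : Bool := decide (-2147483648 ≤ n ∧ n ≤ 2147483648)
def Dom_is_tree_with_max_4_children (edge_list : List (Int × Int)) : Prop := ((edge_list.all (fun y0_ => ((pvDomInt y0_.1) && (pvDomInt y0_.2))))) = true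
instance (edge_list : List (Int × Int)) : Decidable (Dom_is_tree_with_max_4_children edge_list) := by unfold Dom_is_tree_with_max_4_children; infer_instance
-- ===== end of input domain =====

-- B replaces A's BFS-connectivity pass and recursive DFS cycle check by a degree
-- counter plus a fixed-round edge-relaxation closure (objective: simpler).

-- ===== PORT A =====

-- the "for u, v in edge_list: graph[u].append(v); graph[v].append(u); nodes.add(u); nodes.add(v)"
-- loop, which A's Python repeats textually in is_connected and in the main function
def pvGraphNodes (es : List (Int × Int)) : PySem.Dict Int (List Int) × PySem.Set Int :=
  es.foldl (fun st e =>
      (((st.1.modify e.1 [] (· ++ [e.2])).modify e.2 [] (· ++ [e.1])),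
        PySem.Set.add (PySem.Set.add st.2 e.1) e.2))
    (PySem.Dict.empty, PySem.Set.empty)

-- the inner bfs closure of is_connected; fuel bounds the number of while-loop
-- iterations (2*|edge_list|+1 is proved sufficient below, so exhaustion is unreachable)
def pvBfs (g : PySem.Dict Int (List Int)) : Nat → List Int → PySem.Set Int → PySem.Set Int
  | 0, _, vis => vis
  | _ + 1, [], vis => vis
  | fuel + 1, q :: qs, vis =>
      let p := (g.getD q []).foldl
        (fun (p : PySem.Set Int × List Int) w =>
          if w ∉ p.1 then (PySem.Set.add p.1 w, p.2 ++ [w]) else p)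
        (vis, [])
      pvBfs g fuel (qs ++ p.2) p.1

def is_connected (es : List (Int × Int)) : Bool :=
  if es = [] then true
  else
    let st := pvGraphNodes es
    -- start_node = next(iter(nodes)): nodes is nonempty here; headI takes its first
    -- element (A's boolean result does not depend on which element is chosen)
    let start := st.2.headI
    (pvBfs st.1 (2 * es.length + 1) [start] (PySem.Set.add PySem.Set.empty start)).length
      == st.2.length

-- has_cycle's "for neighbor in graph[node]" loop (the recursive call is inlined at
-- its one call site); fuel bounds the recursion depth (again proved sufficient below)
def pvHasCycleAux (g : PySem.Dict Int (List Int)) :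
    Nat → Int → Option Int → List Int → PySem.Set Int → Bool × PySem.Set Int
  | _, _, _, [], vis => (false, vis)
  | fuel, n, p, w :: rest, vis =>
      if w ∉ vis then
        match fuel with
        | 0 => (true, vis)  -- fuel exhaustion, unreachable under the proved bound
        | fuel' + 1 =>
          let r := pvHasCycleAux g fuel' w (some n) (g.getD w []) (PySem.Set.add vis w)
          if r.1 then (true, r.2)
          else pvHasCycleAux g (fuel' + 1) n p rest r.2
      else
        match p with
        | some pv => if w ≠ pv then (true, vis) else pvHasCycleAux g fuel n p rest vis
        | none => pvHasCycleAux g fuel n p rest vis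
  termination_by fuel _ _ l _ => (fuel, l.length)

def has_cycle (g : PySem.Dict Int (List Int)) (node : Int) (visited : PySem.Set Int)
    (parent : Option Int) (fuel : Nat) : Bool × PySem.Set Int :=
  pvHasCycleAux g fuel node parent (g.getD node []) (PySem.Set.add visited node)

def is_tree_with_max_4_children (edge_list : List (Int × Int)) : Bool :=
  if edge_list = [] then false
  else
    let st := pvGraphNodes edge_list
    if st.2.length ≠ 7 then false
    else if ¬ is_connected edge_list then false
    else
      let start := st.2.headI
      if (has_cycle st.1 start PySem.Set.empty none (2 * edge_list.length + 1)).1 then false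
      else if (edge_list.length : Int) ≠ (st.2.length : Int) - 1 then false
      else if st.1.keys.any (fun k => 4 < (st.1.getD k []).length) then false
      else true

-- ===== PORT B =====

def is_tree_with_max_4_children_alt (edge_list : List (Int × Int)) : Bool :=
  if edge_list.length ≠ 6 then false
  else
    let deg : PySem.Dict Int Int := edge_list.foldl
      (fun d e =>
        let d := d.insert e.1 (d.getD e.1 0 + 1)
        d.insert e.2 (d.getD e.2 0 + 1)) PySem.Dict.empty
    if deg.size ≠ 7 then false
    else if deg.values.any (fun c => 4 < c) then false
    else
      let reached := (List.range 6).foldl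
        (fun r _ => edge_list.foldl
          (fun r e => if e.1 ∈ r ∨ e.2 ∈ r then PySem.Set.add (PySem.Set.add r e.1) e.2 else r) r)
        (PySem.Set.add PySem.Set.empty edge_list.headI.1)
      decide (reached.length = 7)

-- ===== PRECONDITION & SPEC =====
def Spec_is_tree_with_max_4_children (edge_list : List (Int × Int)) (out : Bool) : Prop := out = is_tree_with_max_4_children_alt edge_list
instance (edge_list : List (Int × Int)) (out : Bool) : Decidable (Spec_is_tree_with_max_4_children edge_list out) := by unfold Spec_is_tree_with_max_4_children; infer_instance

-- ===== CLAIM (what is proved, stated in full; the proofs are below) =====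
def Claim_equal_is_tree_with_max_4_children : Prop := ∀ (edge_list : List (Int × Int)), Dom_is_tree_with_max_4_children edge_list → Spec_is_tree_with_max_4_children edge_list (is_tree_with_max_4_children edge_list)

-- ===== LEMMAS AND PROOFS =====


-- ---------- semantic layer: endpoints, neighbours, adjacency, connectivity ----------

def pvEnds (es : List (Int × Int)) : List Int := es.flatMap (fun e => [e.1, e.2])

def pvNbrs (x : Int) (es : List (Int × Int)) : List Int :=
  es.flatMap (fun e => (if e.1 = x then [e.2] else []) ++ (if e.2 = x then [e.1] else []))

def pvAdj (es : List (Int × Int)) (x y : Int) : Prop := (x, y) ∈ es ∨ (y, x) ∈ es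

def pvConn (es : List (Int × Int)) : Int → Int → Prop := Relation.ReflTransGen (pvAdj es)

def pvWithin (S : List Int) (es : List (Int × Int)) : List (Int × Int) :=
  es.filter (fun e => decide (e.1 ∈ S) && decide (e.2 ∈ S))

lemma pvAdj_symm {es : List (Int × Int)} {x y : Int} (h : pvAdj es x y) : pvAdj es y x := h.symm.imp id id

lemma pvConn_symm {es : List (Int × Int)} {x y : Int} (h : pvConn es x y) : pvConn es y x :=
  Relation.ReflTransGen.symmetric (fun _ _ h => pvAdj_symm h) h

lemma pvConn_adj {es : List (Int × Int)} {x y : Int} (h : pvAdj es x y) : pvConn es x y :=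
  Relation.ReflTransGen.single h

lemma pvConn_mono {es es' : List (Int × Int)} (h : ∀ u v, pvAdj es u v → pvAdj es' u v)
    {x y : Int} (hc : pvConn es x y) : pvConn es' x y := Relation.ReflTransGen.mono h hc

lemma pvAdj_sub {es es' : List (Int × Int)} (h : ∀ e ∈ es, e ∈ es') {u v : Int}
    (ha : pvAdj es u v) : pvAdj es' u v := ha.imp (h _) (h _)

lemma mem_pvNbrs {x w : Int} {es : List (Int × Int)} : w ∈ pvNbrs x es ↔ pvAdj es x w := by
  simp only [pvNbrs, List.mem_flatMap, pvAdj]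
  constructor
  · rintro ⟨⟨a, b⟩, he, hw⟩
    rcases List.mem_append.1 hw with hw' | hw'
    · have h1 : a = x := by by_contra h; simp [h] at hw'
      have h2 : w = b := by simpa [h1] using hw'
      subst h1; subst h2; exact Or.inl he
    · have h1 : b = x := by by_contra h; simp [h] at hw'
      have h2 : w = a := by simpa [h1] using hw'
      subst h1; subst h2; exact Or.inr he
  · rintro (h | h)
    · exact ⟨(x, w), h, by simp⟩
    · exact ⟨(w, x), h, by simp⟩

lemma mem_pvEnds_of_pvAdj {x w : Int} {es : List (Int × Int)} (h : pvAdj es x w) :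
    x ∈ pvEnds es ∧ w ∈ pvEnds es := by
  rcases h with h | h
  · exact ⟨List.mem_flatMap.2 ⟨(x, w), h, by simp⟩, List.mem_flatMap.2 ⟨(x, w), h, by simp⟩⟩
  · exact ⟨List.mem_flatMap.2 ⟨(w, x), h, by simp⟩, List.mem_flatMap.2 ⟨(w, x), h, by simp⟩⟩

-- ---------- the graph/nodes building loop ----------

lemma pvGraphNodes_snd (es : List (Int × Int)) :
    (pvGraphNodes es).2 = PySem.Set.ofList (pvEnds es) := by
  suffices h : ∀ (d : PySem.Dict Int (List Int)) (s : PySem.Set Int),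
      (es.foldl (fun st e =>
        (((st.1.modify e.1 [] (· ++ [e.2])).modify e.2 [] (· ++ [e.1])),
          PySem.Set.add (PySem.Set.add st.2 e.1) e.2)) (d, s)).2
        = PySem.Set.update s (pvEnds es) by
    simpa [pvGraphNodes, PySem.Set.update_empty] using h PySem.Dict.empty PySem.Set.empty
  induction es with
  | nil => intro d s; simp [pvEnds, PySem.Set.update_nil]
  | cons e es ih =>
    intro d s
    simp only [List.foldl_cons, pvEnds, List.flatMap_cons]
    rw [show ([e.1, e.2] ++ es.flatMap (fun e => [e.1, e.2]))
        = e.1 :: e.2 :: pvEnds es by simp [pvEnds]]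
    rw [PySem.Set.update_cons, PySem.Set.update_cons]
    exact ih _ _

lemma pvGraphNodes_getD (es : List (Int × Int)) (x : Int) :
    (pvGraphNodes es).1.getD x [] = pvNbrs x es := by
  suffices h : ∀ (d : PySem.Dict Int (List Int)) (s : PySem.Set Int),
      (es.foldl (fun st e =>
        (((st.1.modify e.1 [] (· ++ [e.2])).modify e.2 [] (· ++ [e.1])),
          PySem.Set.add (PySem.Set.add st.2 e.1) e.2)) (d, s)).1.getD x []
        = d.getD x [] ++ pvNbrs x es by
    simpa [pvGraphNodes] using h PySem.Dict.empty PySem.Set.empty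
  induction es with
  | nil => intro d s; simp [pvNbrs]
  | cons e es ih =>
    intro d s
    simp only [List.foldl_cons]
    rw [ih]
    simp only [pvNbrs, List.flatMap_cons]
    by_cases h1 : x = e.1 <;> by_cases h2 : x = e.2 <;>
      simp_all [PySem.Dict.getD_modify, List.append_assoc, eq_comm]

lemma pvKeysInsertAdd (d : PySem.Dict Int (List Int)) (k : Int) (v : List Int) :
    (d.insert k v).keys = PySem.Set.add d.keys k := by
  rcases h : d.contains k with _ | _
  · rw [PySem.Dict.keys_insert_of_not_contains d v h,
      PySem.Set.add_of_not_mem (by simpa [← PySem.Dict.contains_iff_mem_keys] using h)]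
  · rw [PySem.Dict.keys_insert_of_contains d v h,
      PySem.Set.add_of_mem (by simpa [← PySem.Dict.contains_iff_mem_keys] using h)]

lemma pvGraphNodes_keys (es : List (Int × Int)) :
    (pvGraphNodes es).1.keys = PySem.Set.ofList (pvEnds es) := by
  suffices h : ∀ (d : PySem.Dict Int (List Int)) (s : PySem.Set Int),
      (es.foldl (fun st e =>
        (((st.1.modify e.1 [] (· ++ [e.2])).modify e.2 [] (· ++ [e.1])),
          PySem.Set.add (PySem.Set.add st.2 e.1) e.2)) (d, s)).1.keys
        = PySem.Set.update d.keys (pvEnds es) by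
    simpa [pvGraphNodes, PySem.Dict.keys_empty, PySem.Set.update_empty]
      using h PySem.Dict.empty PySem.Set.empty
  induction es with
  | nil => intro d s; simp [pvEnds, PySem.Set.update_nil]
  | cons e es ih =>
    intro d s
    simp only [List.foldl_cons]
    rw [ih]
    rw [show pvEnds (e :: es) = e.1 :: e.2 :: pvEnds es by simp [pvEnds]]
    rw [PySem.Set.update_cons, PySem.Set.update_cons]
    congr 1
    rw [PySem.Dict.keys_modify, pvKeysInsertAdd, PySem.Dict.keys_modify, pvKeysInsertAdd]


-- ---------- connectivity counting: a set all whose elements are connected to one of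
-- ---------- AS's anchors by edges of l has at most l.length + AS.card elements ----------

lemma pvConn_nil {x y : Int} (h : pvConn [] x y) : x = y := by
  induction h with
  | refl => rfl
  | tail _ step _ => rcases step with h | h <;> simp at h

lemma pvConn_cons_iff (e : Int × Int) (l : List (Int × Int)) (x y : Int) :
    pvConn (e :: l) x y ↔ pvConn l x y ∨ (pvConn l x e.1 ∧ pvConn l e.2 y) ∨
      (pvConn l x e.2 ∧ pvConn l e.1 y) := by
  constructor
  · intro h
    induction h with
    | refl => exact Or.inl .refl
    | tail _ step ih =>
      rename_i b c _
      have hstep : pvAdj l b c ∨ (b, c) = e ∨ (c, b) = e := by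
        rcases step with h | h <;> rcases List.mem_cons.1 h with h | h
        · exact Or.inr (Or.inl h)
        · exact Or.inl (Or.inl h)
        · exact Or.inr (Or.inr h)
        · exact Or.inl (Or.inr h)
      rcases hstep with hs | hs | hs
      · rcases ih with ih | ⟨ih1, ih2⟩ | ⟨ih1, ih2⟩
        · exact Or.inl (ih.tail hs)
        · exact Or.inr (Or.inl ⟨ih1, ih2.tail hs⟩)
        · exact Or.inr (Or.inr ⟨ih1, ih2.tail hs⟩)
      · have hb : b = e.1 := by rw [← hs]
        have hc : c = e.2 := by rw [← hs]
        subst hb; subst hc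
        rcases ih with ih | ⟨ih1, _⟩ | ⟨ih1, _⟩
        · exact Or.inr (Or.inl ⟨ih, .refl⟩)
        · exact Or.inr (Or.inl ⟨ih1, .refl⟩)
        · exact Or.inl ih1
      · have hb : b = e.2 := by rw [← hs]
        have hc : c = e.1 := by rw [← hs]
        subst hb; subst hc
        rcases ih with ih | ⟨ih1, _⟩ | ⟨ih1, _⟩
        · exact Or.inr (Or.inr ⟨ih, .refl⟩)
        · exact Or.inl ih1
        · exact Or.inr (Or.inr ⟨ih1, .refl⟩)
  · have hmono : ∀ u v, pvConn l u v → pvConn (e :: l) u v :=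
      fun u v h => pvConn_mono (fun _ _ ha => pvAdj_sub (fun _ hx => List.mem_cons_of_mem e hx) ha) h
    have hadj : pvConn (e :: l) e.1 e.2 :=
      pvConn_adj (Or.inl (by simp))
    rintro (h | ⟨h1, h2⟩ | ⟨h1, h2⟩)
    · exact hmono _ _ h
    · exact ((hmono _ _ h1).trans hadj).trans (hmono _ _ h2)
    · exact ((hmono _ _ h1).trans (pvConn_symm hadj)).trans (hmono _ _ h2)

lemma pvConn_card_bound : ∀ (l : List (Int × Int)) (AS V : Finset Int),
    (∀ v ∈ V, ∃ a ∈ AS, pvConn l a v) → V.card ≤ l.length + AS.card := by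
  intro l
  induction l with
  | nil =>
    intro AS V h
    simp only [List.length_nil, Nat.zero_add]
    refine Finset.card_le_card (fun v hv => ?_)
    obtain ⟨a, ha, hc⟩ := h v hv
    rwa [← pvConn_nil hc]
  | cons e l ih =>
    intro AS V h
    by_cases h1 : ∃ a ∈ AS, pvConn l a e.1 <;> by_cases h2 : ∃ a ∈ AS, pvConn l a e.2
    · have : ∀ v ∈ V, ∃ a ∈ AS, pvConn l a v := by
        intro v hv
        obtain ⟨a, ha, hc⟩ := h v hv
        rcases (pvConn_cons_iff e l a v).1 hc with hc | ⟨_, hc2⟩ | ⟨_, hc2⟩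
        · exact ⟨a, ha, hc⟩
        · obtain ⟨a', ha', hc'⟩ := h2; exact ⟨a', ha', hc'.trans hc2⟩
        · obtain ⟨a', ha', hc'⟩ := h1; exact ⟨a', ha', hc'.trans hc2⟩
      calc V.card ≤ l.length + AS.card := ih AS V this
        _ ≤ (e :: l).length + AS.card := by simp
    · have : ∀ v ∈ V, ∃ a ∈ insert e.2 AS, pvConn l a v := by
        intro v hv
        obtain ⟨a, ha, hc⟩ := h v hv
        rcases (pvConn_cons_iff e l a v).1 hc with hc | ⟨hc1, hc2⟩ | ⟨hc1, hc2⟩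
        · exact ⟨a, Finset.mem_insert_of_mem ha, hc⟩
        · exact ⟨e.2, Finset.mem_insert_self _ _, hc2⟩
        · exact absurd ⟨a, ha, hc1⟩ h2
      calc V.card ≤ l.length + (insert e.2 AS).card := ih _ V this
        _ ≤ l.length + (AS.card + 1) := by
            exact Nat.add_le_add_left (Finset.card_insert_le _ _) _
        _ = (e :: l).length + AS.card := by simp [Nat.add_comm, Nat.add_assoc, Nat.add_left_comm]
    · have : ∀ v ∈ V, ∃ a ∈ insert e.1 AS, pvConn l a v := by
        intro v hv
        obtain ⟨a, ha, hc⟩ := h v hv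
        rcases (pvConn_cons_iff e l a v).1 hc with hc | ⟨hc1, hc2⟩ | ⟨hc1, hc2⟩
        · exact ⟨a, Finset.mem_insert_of_mem ha, hc⟩
        · exact absurd ⟨a, ha, hc1⟩ h1
        · exact ⟨e.1, Finset.mem_insert_self _ _, hc2⟩
      calc V.card ≤ l.length + (insert e.1 AS).card := ih _ V this
        _ ≤ l.length + (AS.card + 1) := by
            exact Nat.add_le_add_left (Finset.card_insert_le _ _) _
        _ = (e :: l).length + AS.card := by simp [Nat.add_comm, Nat.add_assoc, Nat.add_left_comm]
    · have : ∀ v ∈ V, ∃ a ∈ AS, pvConn l a v := by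
        intro v hv
        obtain ⟨a, ha, hc⟩ := h v hv
        rcases (pvConn_cons_iff e l a v).1 hc with hc | ⟨hc1, _⟩ | ⟨hc1, _⟩
        · exact ⟨a, ha, hc⟩
        · exact absurd ⟨a, ha, hc1⟩ h1
        · exact absurd ⟨a, ha, hc1⟩ h2
      calc V.card ≤ l.length + AS.card := ih AS V this
        _ ≤ (e :: l).length + AS.card := by simp

-- ---------- Φ-corollaries: with 7 nodes, 6 edges and connectivity, every edge is a
-- ---------- bridge, there are no self-loops and no parallel edges ----------

lemma pvConn_erase_of {es : List (Int × Int)} {a : Int × Int}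
    (h : pvConn (es.erase a) a.1 a.2) {x y : Int} (hc : pvConn es x y) :
    pvConn (es.erase a) x y := by
  induction hc with
  | refl => exact .refl
  | tail _ step ih =>
    rename_i b c _
    rcases step with hs | hs
    · by_cases hba : (b, c) = a
      · have hb : b = a.1 := by rw [← hba]
        have hc2 : c = a.2 := by rw [← hba]
        subst hb; subst hc2
        exact ih.trans h
      · exact ih.tail (Or.inl ((List.mem_erase_of_ne hba).2 hs))
    · by_cases hba : (c, b) = a
      · have hb : b = a.2 := by rw [← hba]
        have hc2 : c = a.1 := by rw [← hba]
        subst hb; subst hc2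
        exact ih.trans (pvConn_symm h)
      · exact ih.tail (Or.inr ((List.mem_erase_of_ne hba).2 hs))

-- the connectivity context Φ of both programs once the length tests have passed
structure PvPhi (es : List (Int × Int)) (s : Int) : Prop where
  hlen : es.length = 6
  hcard : (PySem.Set.ofList (pvEnds es)).length = 7
  hconn : ∀ v ∈ PySem.Set.ofList (pvEnds es), pvConn es s v
  hs : s ∈ PySem.Set.ofList (pvEnds es)

lemma PvPhi.no_removable {es : List (Int × Int)} {s : Int} (φ : PvPhi es s) :
    ∀ a ∈ es, ¬ pvConn (es.erase a) a.1 a.2 := by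
  intro a ha hc
  have hall : ∀ v ∈ (PySem.Set.ofList (pvEnds es)).toFinset, ∃ b ∈ ({s} : Finset Int),
      pvConn (es.erase a) b v := by
    intro v hv
    exact ⟨s, Finset.mem_singleton_self s,
      pvConn_erase_of hc (φ.hconn v (List.mem_toFinset.1 hv))⟩
  have hb := pvConn_card_bound (es.erase a) {s} _ hall
  rw [List.toFinset_card_of_nodup (PySem.Set.nodup_ofList _), φ.hcard,
    List.length_erase_of_mem ha, φ.hlen] at hb
  simp at hb

lemma PvPhi.no_selfloop {es : List (Int × Int)} {s : Int} (φ : PvPhi es s) :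
    ∀ x, (x, x) ∉ es := by
  intro x hx
  exact φ.no_removable (x, x) hx .refl

lemma pvNbrs_count_ne (x w : Int) (hxw : x ≠ w) : ∀ es : List (Int × Int),
    (pvNbrs x es).count w = es.count (x, w) + es.count (w, x) := by
  intro es
  induction es with
  | nil => simp [pvNbrs]
  | cons e es ih =>
    rcases e with ⟨a, b⟩
    simp only [pvNbrs, List.flatMap_cons, List.count_append, List.count_cons] at ih ⊢
    by_cases h1 : a = x <;> by_cases h2 : b = x <;>
      simp [h1, h2, Prod.ext_iff, hxw, List.count_cons] <;>
      (try split_ifs) <;> (try simp_all) <;> (try omega)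

lemma pvNbrs_count_self (x : Int) : ∀ es : List (Int × Int),
    (pvNbrs x es).count x = 2 * es.count (x, x) := by
  intro es
  induction es with
  | nil => simp [pvNbrs]
  | cons e es ih =>
    rcases e with ⟨a, b⟩
    simp only [pvNbrs, List.flatMap_cons, List.count_append, List.count_cons] at ih ⊢
    by_cases h1 : a = x <;> by_cases h2 : b = x <;>
      simp [h1, h2, Prod.ext_iff, List.count_cons] <;>
      (try split_ifs) <;> (try simp_all) <;> (try omega)

lemma PvPhi.nbrs_nodup {es : List (Int × Int)} {s : Int} (φ : PvPhi es s) (x : Int) :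
    (pvNbrs x es).Nodup := by
  rw [List.nodup_iff_count_le_one]
  intro w
  by_cases hxw : x = w
  · subst hxw
    rw [pvNbrs_count_self]
    have : es.count (x, x) = 0 := by
      rw [List.count_eq_zero]
      exact φ.no_selfloop x
    omega
  · rw [pvNbrs_count_ne x w hxw]
    by_contra hgt
    push_neg at hgt
    have c1 : es.count (x, w) ≥ 2 ∨ es.count (w, x) ≥ 2 ∨
        (es.count (x, w) ≥ 1 ∧ es.count (w, x) ≥ 1) := by omega
    rcases c1 with hc | hc | ⟨hc1, hc2⟩
    · have hmem : (x, w) ∈ es := List.count_pos_iff.1 (by omega)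
      have hmem2 : (x, w) ∈ es.erase (x, w) := by
        have := List.count_erase_self (a := ((x, w) : Int × Int)) (l := es)
        exact List.count_pos_iff.1 (by omega)
      exact φ.no_removable (x, w) hmem (pvConn_adj (Or.inl hmem2))
    · have hmem : (w, x) ∈ es := List.count_pos_iff.1 (by omega)
      have hmem2 : (w, x) ∈ es.erase (w, x) := by
        have := List.count_erase_self (a := ((w, x) : Int × Int)) (l := es)
        exact List.count_pos_iff.1 (by omega)
      exact φ.no_removable (w, x) hmem (pvConn_adj (Or.inl hmem2))
    · have hmem : (x, w) ∈ es := List.count_pos_iff.1 (by omega)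
      have hne : ((w, x) : Int × Int) ≠ (x, w) := fun h => hxw (congrArg Prod.snd h)
      have hmem2 : (w, x) ∈ es.erase (x, w) := by
        have := List.count_erase_of_ne hne (l := es)
        exact List.count_pos_iff.1 (by omega)
      exact φ.no_removable (x, w) hmem (pvConn_adj (Or.inr hmem2))


-- ---------- helpers for the DFS invariant ----------

lemma pvWithin_mem {S : List Int} {es : List (Int × Int)} {e : Int × Int} :
    e ∈ pvWithin S es ↔ e ∈ es ∧ e.1 ∈ S ∧ e.2 ∈ S := by
  simp [pvWithin]

lemma pvAdj_within {A : List Int} {es : List (Int × Int)} {n y : Int}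
    (ha : pvAdj es n y) (hn : n ∈ A) (hy : y ∈ A) : pvAdj (pvWithin A es) n y := by
  rcases ha with h | h
  · exact Or.inl (pvWithin_mem.2 ⟨h, hn, hy⟩)
  · exact Or.inr (pvWithin_mem.2 ⟨h, hy, hn⟩)

lemma pvWithin_conn_mono {A B : List Int} (h : ∀ x ∈ A, x ∈ B) {es : List (Int × Int)}
    {u v : Int} (hc : pvConn (pvWithin A es) u v) : pvConn (pvWithin B es) u v := by
  refine pvConn_mono (fun a b ha => pvAdj_sub (fun e he => ?_) ha) hc
  obtain ⟨h1, h2, h3⟩ := pvWithin_mem.1 he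
  exact pvWithin_mem.2 ⟨h1, h _ h2, h _ h3⟩

lemma pvLenLe {l1 l2 : List Int} (h1 : l1.Nodup) (h2 : l2.Nodup)
    (hsub : ∀ x ∈ l1, x ∈ l2) : l1.length ≤ l2.length := by
  rw [← List.toFinset_card_of_nodup h1, ← List.toFinset_card_of_nodup h2]
  exact Finset.card_le_card (fun x hx => List.mem_toFinset.2 (hsub x (List.mem_toFinset.1 hx)))

-- unfolding lemmas for pvHasCycleAux (its equation lemmas are split over p and fuel)

lemma pvHasCycleAux_nil (g : PySem.Dict Int (List Int)) (fuel : Nat) (n : Int)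
    (p : Option Int) (vis : PySem.Set Int) :
    pvHasCycleAux g fuel n p [] vis = (false, vis) := by
  rcases p with _ | pv <;> cases fuel <;> simp only [pvHasCycleAux]

lemma pvHasCycleAux_cons_mem (g : PySem.Dict Int (List Int)) (fuel : Nat) (n : Int)
    (p : Option Int) (w : Int) (rest : List Int) (vis : PySem.Set Int)
    (hw : w ∈ vis) (hnt : ∀ pv, p = some pv → w = pv) :
    pvHasCycleAux g fuel n p (w :: rest) vis = pvHasCycleAux g fuel n p rest vis := by
  rcases p with _ | pv
  · cases fuel <;>
      (simp only [pvHasCycleAux]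
       rw [if_neg (fun hcon => hcon hw)])
  · have hwp := hnt pv rfl
    cases fuel <;>
      (simp only [pvHasCycleAux]
       rw [if_neg (fun hcon => hcon hw), if_neg (fun hcon => hcon hwp)])

lemma pvHasCycleAux_cons_new (g : PySem.Dict Int (List Int)) (fuel' : Nat) (n : Int)
    (p : Option Int) (w : Int) (rest : List Int) (vis : PySem.Set Int) (hw : w ∉ vis) :
    pvHasCycleAux g (fuel' + 1) n p (w :: rest) vis =
      (if (pvHasCycleAux g fuel' w (some n) (g.getD w []) (PySem.Set.add vis w)).1 then
        (true, (pvHasCycleAux g fuel' w (some n) (g.getD w []) (PySem.Set.add vis w)).2)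
      else pvHasCycleAux g (fuel' + 1) n p rest
        (pvHasCycleAux g fuel' w (some n) (g.getD w []) (PySem.Set.add vis w)).2) := by
  rcases p with _ | pv <;>
    (simp only [pvHasCycleAux]
     rw [if_pos hw])

-- ---------- DFS: under Φ, has_cycle returns false and visits only connected nodes ----------

lemma pvHasCycleAux_ok (es : List (Int × Int)) (s : Int) (φ : PvPhi es s)
    (g : PySem.Dict Int (List Int)) (hg : ∀ x, g.getD x [] = pvNbrs x es) :
    ∀ (fuel : Nat) (rem scanned : List Int) (n : Int) (p : Option Int)
      (vis visIn : PySem.Set Int),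
      pvNbrs n es = scanned ++ rem →
      n ∈ vis →
      (∀ x ∈ vis, x ∈ pvEnds es) →
      vis.Nodup →
      (∀ x ∈ visIn, x ∈ vis) →
      n ∉ visIn →
      (∀ y ∈ scanned, y ∈ vis) →
      (∀ pv, p = some pv → pv ∈ visIn ∧ pvAdj es n pv) →
      (PySem.Set.ofList (pvEnds es)).length + 1 ≤ fuel + vis.length →
      (∀ x ∈ vis, x ∉ visIn →
        pvConn (pvWithin (vis.filter (fun z => decide (z ∉ visIn))) es) n x) →
      (∀ x ∈ vis, x ≠ n → ∃ y, (y ∈ scanned ∨ p = some y) ∧ pvAdj es n y ∧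
        pvConn (pvWithin (vis.erase n) es) y x) →
      (pvHasCycleAux g fuel n p rem vis).1 = false ∧
      (∀ x ∈ vis, x ∈ (pvHasCycleAux g fuel n p rem vis).2) ∧
      (∀ x ∈ (pvHasCycleAux g fuel n p rem vis).2, x ∈ pvEnds es) ∧
      (pvHasCycleAux g fuel n p rem vis).2.Nodup ∧
      (∀ x ∈ (pvHasCycleAux g fuel n p rem vis).2, x ∉ visIn →
        pvConn (pvWithin ((pvHasCycleAux g fuel n p rem vis).2.filter
          (fun z => decide (z ∉ visIn))) es) n x) := by
  have hnodupNs : (PySem.Set.ofList (pvEnds es)).Nodup := PySem.Set.nodup_ofList _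
  intro fuel
  induction fuel with
  | zero =>
    intro rem scanned n p vis visIn _ _ hvsub hnodup _ _ _ _ hfuel _ _
    exfalso
    have : vis.length ≤ (PySem.Set.ofList (pvEnds es)).length :=
      pvLenLe hnodup hnodupNs (fun x hx => (PySem.Set.mem_ofList _ _).2 (hvsub x hx))
    omega
  | succ fuel' ihf =>
    intro rem
    induction rem with
    | nil =>
      intro scanned n p vis visIn _ hnvis hvsub hnodup hIn _ _ _ _ hPOST _
      rw [pvHasCycleAux_nil]
      exact ⟨rfl, fun x hx => hx, hvsub, hnodup, hPOST⟩
    | cons w rest ihr =>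
      intro scanned n p vis visIn hsplit hnvis hvsub hnodup hIn hnIn hscan hp hfuel hPOST hINV
      have hwnbrs : w ∈ pvNbrs n es := by rw [hsplit]; simp
      have hadj_nw : pvAdj es n w := mem_pvNbrs.1 hwnbrs
      have hw_ne_n : w ≠ n := by
        intro hcon
        subst hcon
        rcases hadj_nw with h | h <;> exact φ.no_selfloop w h
      by_cases hw : w ∈ vis
      · -- neighbour already visited: Python either returns True (impossible under Φ) or skips
        have hnotrue : ∀ pv, p = some pv → w = pv := by
          intro pv hpv
          by_contra hwp
          -- the DFS found a "back edge" (n, w): build a connection avoiding that edge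
          obtain ⟨y, hy, hyadj, hyconn⟩ := hINV w hw hw_ne_n
          have hy_ne_w : y ≠ w := by
            rcases hy with hy | hy
            · rintro rfl
              have hnd := φ.nbrs_nodup n
              rw [hsplit] at hnd
              exact (List.disjoint_of_nodup_append hnd) hy (by simp)
            · rintro rfl
              rw [hpv] at hy
              exact hwp (Option.some.inj hy).symm
          -- the witness occurrence of the edge {n, w}
          have step2 : ∀ (a : Int × Int), a.1 = n ∨ a.2 = n →
              pvConn (es.erase a) y w := by
            intro a han
            refine pvConn_mono (fun u v ha => pvAdj_sub (fun e he => ?_) ha) hyconn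
            obtain ⟨h1, h2, h3⟩ := pvWithin_mem.1 he
            have hne1 : e.1 ≠ n := ((List.Nodup.mem_erase_iff hnodup).1 h2).1
            have hne2 : e.2 ≠ n := ((List.Nodup.mem_erase_iff hnodup).1 h3).1
            refine (List.mem_erase_of_ne ?_).2 h1
            rintro rfl
            rcases han with h | h
            · exact hne1 h
            · exact hne2 h
          rcases hadj_nw with hocc | hocc
          · -- the occurrence is (n, w) ∈ es
            refine φ.no_removable (n, w) hocc ?_
            have step1 : pvAdj (es.erase (n, w)) n y := by
              refine hyadj.imp (fun h => (List.mem_erase_of_ne ?_).2 h)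
                (fun h => (List.mem_erase_of_ne ?_).2 h)
              · intro hcon; exact hy_ne_w (congrArg Prod.snd hcon)
              · intro hcon; exact hw_ne_n (congrArg Prod.snd hcon).symm
            exact (Relation.ReflTransGen.single step1).trans (step2 (n, w) (Or.inl rfl))
          · -- the occurrence is (w, n) ∈ es
            refine φ.no_removable (w, n) hocc ?_
            have step1 : pvAdj (es.erase (w, n)) n y := by
              refine hyadj.imp (fun h => (List.mem_erase_of_ne ?_).2 h)
                (fun h => (List.mem_erase_of_ne ?_).2 h)
              · intro hcon; exact hw_ne_n (congrArg Prod.fst hcon).symm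
              · intro hcon; exact hy_ne_w (congrArg Prod.fst hcon)
            exact pvConn_symm
              ((Relation.ReflTransGen.single step1).trans (step2 (w, n) (Or.inr rfl)))
        -- now the loop simply continues on the rest of the neighbour list
        have hEq := pvHasCycleAux_cons_mem g (fuel' + 1) n p w rest vis hw hnotrue
        rw [hEq]
        refine ihr (scanned ++ [w]) n p vis visIn (by rw [hsplit, List.append_assoc]; rfl)
          hnvis hvsub hnodup hIn hnIn
          (fun y hy => by
            rcases List.mem_append.1 hy with hy | hy
            · exact hscan y hy
            · simp at hy; subst hy; exact hw)
          hp (by omega) hPOST ?_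
        intro x hx hxn
        obtain ⟨y, hy, hyadj, hyconn⟩ := hINV x hx hxn
        refine ⟨y, ?_, hyadj, hyconn⟩
        rcases hy with hy | hy
        · exact Or.inl (List.mem_append_left _ hy)
        · exact Or.inr hy
      · -- unvisited neighbour: recurse into it (the inlined has_cycle call)
        have hgw : g.getD w [] = pvNbrs w es := hg w
        have hvisC_eq : PySem.Set.add vis w = vis ++ [w] := PySem.Set.add_of_not_mem hw
        have hwE : w ∈ pvEnds es := (mem_pvEnds_of_pvAdj hadj_nw).2
        have hmemC : ∀ x ∈ vis, x ∈ PySem.Set.add vis w := by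
          intro x hx; rw [hvisC_eq]; exact List.mem_append_left _ hx
        have hwC : w ∈ PySem.Set.add vis w := by rw [hvisC_eq]; simp
        have hnodupC : (PySem.Set.add vis w).Nodup := PySem.Set.nodup_add _ _ hnodup
        have heraseC : (PySem.Set.add vis w).erase w = vis := by
          rw [hvisC_eq, List.erase_append_right _ hw]; simp
        -- the child call satisfies the invariant with visIn := vis
        obtain ⟨hr1, hr2, hr3, hr4, hr5⟩ :=
          ihf (g.getD w []) [] w (some n) (PySem.Set.add vis w) vis
            (by rw [hgw]; simp)
            hwC
            (by intro x hx
                rw [hvisC_eq] at hx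
                rcases List.mem_append.1 hx with hx | hx
                · exact hvsub x hx
                · simp at hx; subst hx; exact hwE)
            hnodupC
            hmemC
            hw
            (fun y hy => absurd hy (by simp))
            (by rintro pv ⟨rfl⟩; exact ⟨hnvis, pvAdj_symm hadj_nw⟩)
            (by rw [hvisC_eq]; simp only [List.length_append, List.length_cons,
                List.length_nil]; omega)
            (by intro x hx hxv
                have hxw : x = w := by
                  rw [hvisC_eq] at hx
                  rcases List.mem_append.1 hx with hx | hx
                  · exact absurd hx hxv
                  · simpa using hx
                subst hxw; exact .refl)
            (by intro x hx hxw
                refine ⟨n, Or.inr rfl, pvAdj_symm hadj_nw, ?_⟩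
                rw [heraseC]
                have hxvis : x ∈ vis := by
                  rw [hvisC_eq] at hx
                  rcases List.mem_append.1 hx with hx | hx
                  · exact hx
                  · exact absurd (by simpa using hx) hxw
                by_cases hxn : x = n
                · subst hxn; exact .refl
                · obtain ⟨y, hy, hyadj, hyconn⟩ := hINV x hxvis hxn
                  have hyvis : y ∈ vis := by
                    rcases hy with hy | hy
                    · exact hscan y hy
                    · exact hIn y (hp y hy).1
                  refine (pvConn_adj (pvAdj_within hyadj hnvis hyvis)).trans ?_
                  exact pvWithin_conn_mono (fun z hz => List.mem_of_mem_erase hz) hyconn)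
        set r := pvHasCycleAux g fuel' w (some n) (g.getD w []) (PySem.Set.add vis w) with hrdef
        have hsubr : ∀ x ∈ vis, x ∈ r.2 := fun x hx => hr2 x (hmemC x hx)
        have hlenr : (PySem.Set.add vis w).length ≤ r.2.length :=
          pvLenLe hnodupC hr4 hr2
        have hlenC : (PySem.Set.add vis w).length = vis.length + 1 := by
          rw [hvisC_eq]; simp
        have hnotvisIn : ∀ z, z ∉ vis → z ∉ visIn := fun z hz hcon => hz (hIn z hcon)
        -- the loop then continues on rest from the child's visited set
        obtain ⟨hc1, hc2, hc3, hc4, hc5⟩ :=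
          ihr (scanned ++ [w]) n p r.2 visIn
            (by rw [hsplit, List.append_assoc]; rfl)
            (hsubr n hnvis)
            hr3
            hr4
            (fun x hx => hsubr x (hIn x hx))
            hnIn
            (fun y hy => by
              rcases List.mem_append.1 hy with hy | hy
              · exact hsubr y (hscan y hy)
              · have hyw : y = w := by simpa using hy
                rw [hyw]; exact hr2 w hwC)
            hp
            (by omega)
            (by -- POST carries over: old nodes by monotonicity, new ones through w
              intro x hx hxIn
              by_cases hxv : x ∈ vis
              · refine pvWithin_conn_mono ?_ (hPOST x hxv hxIn)
                intro z hz
                rw [List.mem_filter] at hz ⊢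
                exact ⟨hsubr z hz.1, hz.2⟩
              · have hx5 := hr5 x hx hxv
                have hwfil : w ∈ r.2.filter (fun z => decide (z ∉ visIn)) := by
                  rw [List.mem_filter]
                  exact ⟨hr2 w hwC, by simpa using hnotvisIn w hw⟩
                have hnfil : n ∈ r.2.filter (fun z => decide (z ∉ visIn)) := by
                  rw [List.mem_filter]
                  exact ⟨hsubr n hnvis, by simpa using hnIn⟩
                refine (pvConn_adj (pvAdj_within hadj_nw hnfil hwfil)).trans ?_
                refine pvWithin_conn_mono ?_ hx5
                intro z hz
                rw [List.mem_filter] at hz ⊢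
                refine ⟨hz.1, ?_⟩
                have : z ∉ vis := by simpa using hz.2
                simpa using hnotvisIn z this)
            (by -- the loop invariant after returning from the child
              intro x hx hxn
              by_cases hxv : x ∈ vis
              · obtain ⟨y, hy, hyadj, hyconn⟩ := hINV x hxv hxn
                refine ⟨y, ?_, hyadj, pvWithin_conn_mono ?_ hyconn⟩
                · rcases hy with hy | hy
                  · exact Or.inl (List.mem_append_left _ hy)
                  · exact Or.inr hy
                · intro z hz
                  rw [List.Nodup.mem_erase_iff hnodup] at hz
                  rw [List.Nodup.mem_erase_iff hr4]
                  exact ⟨hz.1, hsubr z hz.2⟩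
              · refine ⟨w, Or.inl (by simp), hadj_nw, ?_⟩
                refine pvWithin_conn_mono ?_ (hr5 x hx hxv)
                intro z hz
                rw [List.mem_filter] at hz
                rw [List.Nodup.mem_erase_iff hr4]
                have hz2 : z ∉ vis := by simpa using hz.2
                exact ⟨fun hcon => hz2 (hcon ▸ hnvis), hz.1⟩)
        -- assemble: the child returned False, so execution continues into the rest
        have hEq0 := pvHasCycleAux_cons_new g fuel' n p w rest vis hw
        rw [← hrdef, hr1, if_neg (by simp : ¬(false = true))] at hEq0
        rw [hEq0]
        exact ⟨hc1, fun x hx => hc2 x (hsubr x hx), hc3, hc4, hc5⟩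


-- ---------- BFS: is_connected is exactly reachability of every node from the first ----------

lemma pvEnds_length (es : List (Int × Int)) : (pvEnds es).length = 2 * es.length := by
  induction es with
  | nil => simp [pvEnds]
  | cons e es ih => simp [pvEnds] at ih ⊢; omega

lemma pvSubsetEq {l1 l2 : List Int} (h1 : l1.Nodup) (h2 : l2.Nodup)
    (hsub : ∀ x ∈ l1, x ∈ l2) (hlen : l2.length ≤ l1.length) : ∀ x ∈ l2, x ∈ l1 := by
  have hfin : l2.toFinset ⊆ l1.toFinset := by
    have hsub' : l1.toFinset ⊆ l2.toFinset :=
      fun x hx => List.mem_toFinset.2 (hsub x (List.mem_toFinset.1 hx))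
    have hcard : l2.toFinset.card ≤ l1.toFinset.card := by
      rw [List.toFinset_card_of_nodup h1, List.toFinset_card_of_nodup h2]
      exact hlen
    rw [Finset.eq_of_subset_of_card_le hsub' hcard]
  exact fun x hx => List.mem_toFinset.1 (hfin (List.mem_toFinset.2 hx))

-- the body of the "for neighbor in graph[current]" loop of bfs
def pvBfsStep : PySem.Set Int × List Int → Int → PySem.Set Int × List Int :=
  fun p w => if w ∉ p.1 then (PySem.Set.add p.1 w, p.2 ++ [w]) else p

lemma pvBfsFold (l : List Int) : ∀ (vis0 : PySem.Set Int) (acc : List Int),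
    vis0.Nodup → (∀ x ∈ acc, x ∈ vis0) →
    (∀ x, x ∈ (l.foldl pvBfsStep (vis0, acc)).1 ↔ x ∈ vis0 ∨ x ∈ l) ∧
    (l.foldl pvBfsStep (vis0, acc)).1.Nodup ∧
    (∀ x ∈ (l.foldl pvBfsStep (vis0, acc)).2, x ∈ (l.foldl pvBfsStep (vis0, acc)).1) ∧
    (l.foldl pvBfsStep (vis0, acc)).1.length + acc.length
      = vis0.length + (l.foldl pvBfsStep (vis0, acc)).2.length ∧
    (∀ x ∈ (l.foldl pvBfsStep (vis0, acc)).1, x ∈ vis0 ∨ x ∈ (l.foldl pvBfsStep (vis0, acc)).2) ∧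
    (∀ x ∈ acc, x ∈ (l.foldl pvBfsStep (vis0, acc)).2) := by
  induction l with
  | nil =>
    intro vis0 acc hnd hacc
    simp only [List.foldl_nil]
    exact ⟨fun x => by simp, hnd, hacc, by trivial, fun x hx => Or.inl hx, fun x hx => hx⟩
  | cons w l ih =>
    intro vis0 acc hnd hacc
    simp only [List.foldl_cons]
    by_cases hw : w ∈ vis0
    · rw [show pvBfsStep (vis0, acc) w = (vis0, acc) by
        simp only [pvBfsStep]; rw [if_neg (fun hcon => hcon hw)]]
      obtain ⟨h1, h2, h3, h4, h5, h6⟩ := ih vis0 acc hnd hacc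
      refine ⟨fun x => ?_, h2, h3, h4, h5, h6⟩
      rw [h1]
      constructor
      · rintro (hx | hx)
        · exact Or.inl hx
        · exact Or.inr (List.mem_cons_of_mem w hx)
      · rintro (hx | hx)
        · exact Or.inl hx
        · rcases List.mem_cons.1 hx with rfl | hx
          · exact Or.inl hw
          · exact Or.inr hx
    · rw [show pvBfsStep (vis0, acc) w = (PySem.Set.add vis0 w, acc ++ [w]) by
        simp only [pvBfsStep]; rw [if_pos hw]]
      have hnd' : (PySem.Set.add vis0 w).Nodup := PySem.Set.nodup_add _ _ hnd
      have hmemadd : ∀ x, x ∈ PySem.Set.add vis0 w ↔ x ∈ vis0 ∨ x = w :=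
        fun x => PySem.Set.mem_add vis0 w x
      have hlenadd : (PySem.Set.add vis0 w).length = vis0.length + 1 := by
        rw [PySem.Set.add_of_not_mem hw]; simp
      obtain ⟨h1, h2, h3, h4, h5, h6⟩ := ih (PySem.Set.add vis0 w) (acc ++ [w]) hnd'
        (by intro x hx
            rcases List.mem_append.1 hx with hx | hx
            · exact (hmemadd x).2 (Or.inl (hacc x hx))
            · exact (hmemadd x).2 (Or.inr (by simpa using hx)))
      refine ⟨fun x => ?_, h2, h3, ?_, ?_, ?_⟩
      · rw [h1]
        constructor
        · rintro (hx | hx)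
          · rcases (hmemadd x).1 hx with hx | rfl
            · exact Or.inl hx
            · exact Or.inr (by simp)
          · exact Or.inr (List.mem_cons_of_mem w hx)
        · rintro (hx | hx)
          · exact Or.inl ((hmemadd x).2 (Or.inl hx))
          · rcases List.mem_cons.1 hx with rfl | hx
            · exact Or.inl ((hmemadd x).2 (Or.inr rfl))
            · exact Or.inr hx
      · simp only [List.length_append, List.length_cons, List.length_nil] at h4 ⊢
        omega
      · intro x hx
        rcases h5 x hx with hx | hx
        · rcases (hmemadd x).1 hx with hx | rfl
          · exact Or.inl hx
          · exact Or.inr (h6 _ (by simp))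
        · exact Or.inr hx
      · intro x hx
        exact h6 x (List.mem_append_left _ hx)

lemma pvBfs_ok (es : List (Int × Int)) (s : Int)
    (g : PySem.Dict Int (List Int)) (hg : ∀ x, g.getD x [] = pvNbrs x es) :
    ∀ (fuel : Nat) (queue : List Int) (vis : PySem.Set Int),
      (∀ x ∈ queue, x ∈ vis) →
      (∀ x ∈ vis, x ∈ pvEnds es) →
      (∀ x ∈ vis, pvConn es s x) →
      vis.Nodup →
      (∀ x ∈ vis, x ∈ queue ∨ ∀ w ∈ pvNbrs x es, w ∈ vis) →
      queue.length + (PySem.Set.ofList (pvEnds es)).length < fuel + vis.length →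
      (∀ x ∈ vis, x ∈ pvBfs g fuel queue vis) ∧
      (∀ x ∈ pvBfs g fuel queue vis, pvConn es s x) ∧
      (∀ x ∈ pvBfs g fuel queue vis, x ∈ pvEnds es) ∧
      (pvBfs g fuel queue vis).Nodup ∧
      (∀ x ∈ pvBfs g fuel queue vis, ∀ w ∈ pvNbrs x es, w ∈ pvBfs g fuel queue vis) := by
  intro fuel
  induction fuel with
  | zero =>
    intro queue vis hq hvsub hsound hnodup hCL hfuel
    exfalso
    have : vis.length ≤ (PySem.Set.ofList (pvEnds es)).length :=
      pvLenLe hnodup (PySem.Set.nodup_ofList _)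
        (fun x hx => (PySem.Set.mem_ofList _ _).2 (hvsub x hx))
    omega
  | succ fuel' ih =>
    intro queue vis hq hvsub hsound hnodup hCL hfuel
    match queue with
    | [] =>
      refine ⟨fun x hx => hx, hsound, hvsub, hnodup, fun x hx w hw => ?_⟩
      rcases hCL x hx with hx' | hx'
      · exact absurd hx' (by simp)
      · exact hx' w hw
    | q :: qs =>
      have hqvis : q ∈ vis := hq q (by simp)
      obtain ⟨h1, h2, h3, h4, h5, h6⟩ := pvBfsFold (pvNbrs q es) vis [] hnodup (by simp)
      have hstep : pvBfs g (fuel' + 1) (q :: qs) vis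
          = pvBfs g fuel' (qs ++ ((pvNbrs q es).foldl pvBfsStep (vis, [])).2)
              ((pvNbrs q es).foldl pvBfsStep (vis, [])).1 := by
        simp only [pvBfs]
        rw [hg q]
        rfl
      rw [hstep]
      obtain ⟨ih1, ih2, ih3, ih4, ih5⟩ := ih (qs ++ ((pvNbrs q es).foldl pvBfsStep (vis, [])).2)
        ((pvNbrs q es).foldl pvBfsStep (vis, [])).1
        (by intro x hx
            rcases List.mem_append.1 hx with hx | hx
            · exact (h1 x).2 (Or.inl (hq x (List.mem_cons_of_mem q hx)))
            · exact h3 x hx)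
        (by intro x hx
            rcases (h1 x).1 hx with hx | hx
            · exact hvsub x hx
            · exact (mem_pvEnds_of_pvAdj (mem_pvNbrs.1 hx)).2)
        (by intro x hx
            rcases (h1 x).1 hx with hx | hx
            · exact hsound x hx
            · exact (hsound q hqvis).tail (mem_pvNbrs.1 hx))
        h2
        (by intro x hx
            by_cases hxq : x = q
            · subst hxq
              right
              intro w hw
              exact (h1 w).2 (Or.inr hw)
            · rcases h5 x hx with hxv | hxn
              · rcases hCL x hxv with hx' | hx'
                · rcases List.mem_cons.1 hx' with hx'' | hx''
                  · exact absurd hx'' hxq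
                  · exact Or.inl (List.mem_append_left _ hx'')
                · right
                  intro w hw
                  exact (h1 w).2 (Or.inl (hx' w hw))
              · exact Or.inl (List.mem_append_right _ hxn))
        (by simp only [List.length_append]
            simp only [List.length_nil] at h4
            simp only [List.length_cons] at hfuel
            omega)
      exact ⟨fun x hx => ih1 x ((h1 x).2 (Or.inl hx)), ih2, ih3, ih4, ih5⟩


-- ---------- characterisation of is_connected ----------

lemma pvNs_cons (e : Int × Int) (es : List (Int × Int)) :
    PySem.Set.ofList (pvEnds (e :: es))
      = e.1 :: PySem.Set.discard (PySem.Set.ofList (e.2 :: pvEnds es)) e.1 := by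
  show PySem.Set.ofList (e.1 :: e.2 :: pvEnds es) = _
  rw [PySem.Set.ofList_cons]

lemma pvNs_headI (e : Int × Int) (es : List (Int × Int)) :
    (PySem.Set.ofList (pvEnds (e :: es))).headI = e.1 := by
  rw [pvNs_cons]; rfl

lemma pvNs_ne_nil (e : Int × Int) (es : List (Int × Int)) :
    PySem.Set.ofList (pvEnds (e :: es)) ≠ [] := by
  rw [pvNs_cons]; simp

lemma pvHeadI_mem {l : List Int} (h : l ≠ []) : l.headI ∈ l := by
  cases l with
  | nil => exact absurd rfl h
  | cons x xs => simp

lemma is_connected_iff (es : List (Int × Int)) (hne : es ≠ []) :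
    is_connected es = true ↔
      (∀ v ∈ PySem.Set.ofList (pvEnds es),
        pvConn es (PySem.Set.ofList (pvEnds es)).headI v) := by
  have hnsne : PySem.Set.ofList (pvEnds es) ≠ [] := by
    cases es with
    | nil => exact absurd rfl hne
    | cons e es => exact pvNs_ne_nil e es
  have hg : ∀ x, (pvGraphNodes es).1.getD x [] = pvNbrs x es := pvGraphNodes_getD es
  have hNsnd : (pvGraphNodes es).2 = PySem.Set.ofList (pvEnds es) := pvGraphNodes_snd es
  set ns := PySem.Set.ofList (pvEnds es) with hns
  set s := ns.headI with hsdef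
  have hsmem : s ∈ ns := pvHeadI_mem hnsne
  have hsE : s ∈ pvEnds es := (PySem.Set.mem_ofList _ _).1 hsmem
  have hnodupNs : ns.Nodup := PySem.Set.nodup_ofList _
  have hNle : ns.length ≤ 2 * es.length := by
    have := PySem.Set.length_ofList_le (pvEnds es)
    rw [pvEnds_length] at this
    exact this
  have hstart : (PySem.Set.add PySem.Set.empty s) = [s] := rfl
  obtain ⟨b1, b2, b3, b4, b5⟩ := pvBfs_ok es s (pvGraphNodes es).1 hg
    (2 * es.length + 1) [s] (PySem.Set.add PySem.Set.empty s)
    (by intro x hx; simpa using hx)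
    (by intro x hx; simp at hx; subst hx; exact hsE)
    (by intro x hx; simp at hx; subst hx; exact .refl)
    (by simp [PySem.Set.empty])
    (by intro x hx; simp at hx; subst hx; exact Or.inl (by simp))
    (by rw [hstart]
        simp only [List.length_cons, List.length_nil]
        rw [← hns]
        omega)
  rw [hstart] at b1 b2 b3 b4 b5
  set R := pvBfs (pvGraphNodes es).1 (2 * es.length + 1) [s] [s] with hR
  have hRsubNs : ∀ x ∈ R, x ∈ ns := by
    intro x hx
    exact (PySem.Set.mem_ofList _ _).2 (b3 x hx)
  have hreach : ∀ v, pvConn es s v → v ∈ pvEnds es → v ∈ R := by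
    intro v hv
    induction hv with
    | refl => intro _; exact b1 s (by simp)
    | tail h step ih =>
      intro _
      rename_i b c _
      have hbE : b ∈ pvEnds es := (mem_pvEnds_of_pvAdj step).1
      exact b5 b (ih hbE) c (mem_pvNbrs.2 step)
  have hgoal : is_connected es = (R.length == ns.length) := by
    simp only [is_connected]
    rw [if_neg hne, hNsnd, ← hsdef, hstart]
  rw [hgoal]
  constructor
  · intro h v hv
    have hlen : ns.length ≤ R.length := by
      have : R.length = ns.length := by simpa using h
      omega
    exact b2 v (pvSubsetEq b4 hnodupNs hRsubNs hlen v hv)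
  · intro hconn
    have hsup : ∀ v ∈ ns, v ∈ R := by
      intro v hv
      exact hreach v (hconn v hv) ((PySem.Set.mem_ofList _ _).1 hv)
    have hlen : R.length = ns.length :=
      Nat.le_antisymm (pvLenLe b4 hnodupNs hRsubNs) (pvLenLe hnodupNs b4 hsup)
    simpa using hlen

-- ---------- the DFS entry call returns false under Φ ----------

lemma has_cycle_false (es : List (Int × Int)) (s : Int) (φ : PvPhi es s) :
    (has_cycle (pvGraphNodes es).1 s PySem.Set.empty none (2 * es.length + 1)).1 = false := by
  have hg : ∀ x, (pvGraphNodes es).1.getD x [] = pvNbrs x es := pvGraphNodes_getD es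
  have hstart : (PySem.Set.add PySem.Set.empty s) = [s] := rfl
  have hsE : s ∈ pvEnds es := (PySem.Set.mem_ofList _ _).1 φ.hs
  obtain ⟨h1, _, _, _, _⟩ := pvHasCycleAux_ok es s φ (pvGraphNodes es).1 hg
    (2 * es.length + 1) (pvNbrs s es) [] s none [s] []
    (by simp)
    (by simp)
    (by intro x hx; simp at hx; subst hx; exact hsE)
    (by simp)
    (by simp)
    (by simp)
    (by simp)
    (by simp)
    (by simp only [List.length_cons, List.length_nil]
        have := φ.hcard
        have := φ.hlen
        omega)
    (by intro x hx hx2; simp at hx; subst hx; exact .refl)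
    (by intro x hx hx2; simp at hx; exact absurd hx hx2)
  show (pvHasCycleAux (pvGraphNodes es).1 (2 * es.length + 1) s none
    ((pvGraphNodes es).1.getD s []) (PySem.Set.add PySem.Set.empty s)).1 = false
  rw [hstart, hg s]
  exact h1

-- ---------- B-side: the degree dictionary and the relaxation closure ----------

lemma pvDegFold (es : List (Int × Int)) :
    es.foldl (fun d e =>
        ((d.insert e.1 (d.getD e.1 0 + 1)).insert e.2
          ((d.insert e.1 (d.getD e.1 0 + 1)).getD e.2 0 + 1)))
      (PySem.Dict.empty : PySem.Dict Int Int)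
    = (pvEnds es).foldl (fun d x => d.insert x (d.getD x 0 + 1)) PySem.Dict.empty := by
  suffices h : ∀ d : PySem.Dict Int Int,
      es.foldl (fun d e =>
        ((d.insert e.1 (d.getD e.1 0 + 1)).insert e.2
          ((d.insert e.1 (d.getD e.1 0 + 1)).getD e.2 0 + 1))) d
      = (pvEnds es).foldl (fun d x => d.insert x (d.getD x 0 + 1)) d from h _
  induction es with
  | nil => intro d; simp [pvEnds]
  | cons e es ih =>
    intro d
    show _ = ((e.1 :: e.2 :: pvEnds es).foldl (fun d x => d.insert x (d.getD x 0 + 1)) d)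
    simp only [List.foldl_cons]
    exact ih _

lemma pvNbrs_length (x : Int) (es : List (Int × Int)) :
    (pvNbrs x es).length = (pvEnds es).count x := by
  induction es with
  | nil => simp [pvNbrs, pvEnds]
  | cons e es ih =>
    simp only [pvNbrs, pvEnds, List.flatMap_cons, List.length_append, List.count_cons,
      List.count_append] at ih ⊢
    by_cases h1 : e.1 = x <;> by_cases h2 : e.2 = x <;>
      simp [h1, h2, pvNbrs, pvEnds] at ih ⊢ <;> omega

-- ---------- B-side: the edge-relaxation closure ----------

-- the body of B's "for u, v in edge_list" relaxation loop
def pvClStep : PySem.Set Int → (Int × Int) → PySem.Set Int :=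
  fun r e => if e.1 ∈ r ∨ e.2 ∈ r then PySem.Set.add (PySem.Set.add r e.1) e.2 else r

lemma pvAdd_append (r : PySem.Set Int) (x : Int) : ∃ t, PySem.Set.add r x = r ++ t := by
  rw [PySem.Set.add_eq_ite]
  by_cases hx : x ∈ r
  · exact ⟨[], by simp [hx]⟩
  · exact ⟨[x], by simp [hx]⟩

lemma pvCl_append (l : List (Int × Int)) : ∀ r : PySem.Set Int,
    ∃ t, l.foldl pvClStep r = r ++ t := by
  induction l with
  | nil => intro r; exact ⟨[], by simp⟩
  | cons e l ih =>
    intro r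
    simp only [List.foldl_cons]
    obtain ⟨t1, ht1⟩ : ∃ t, pvClStep r e = r ++ t := by
      simp only [pvClStep]
      split_ifs with hc
      · obtain ⟨ta, hta⟩ := pvAdd_append r e.1
        obtain ⟨tb, htb⟩ := pvAdd_append (PySem.Set.add r e.1) e.2
        exact ⟨ta ++ tb, by rw [htb, hta, List.append_assoc]⟩
      · exact ⟨[], by simp⟩
    obtain ⟨t2, ht2⟩ := ih (pvClStep r e)
    exact ⟨t1 ++ t2, by rw [ht2, ht1, List.append_assoc]⟩

lemma pvCl_sub (l : List (Int × Int)) (r : PySem.Set Int) : ∀ x ∈ r, x ∈ l.foldl pvClStep r := by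
  obtain ⟨t, ht⟩ := pvCl_append l r
  rw [ht]
  exact fun x hx => List.mem_append_left _ hx

lemma pvCl_nodup (l : List (Int × Int)) : ∀ r : PySem.Set Int,
    r.Nodup → (l.foldl pvClStep r).Nodup := by
  induction l with
  | nil => intro r h; simpa using h
  | cons e l ih =>
    intro r h
    simp only [List.foldl_cons]
    refine ih _ ?_
    simp only [pvClStep]
    split_ifs with hc
    · exact PySem.Set.nodup_add _ _ (PySem.Set.nodup_add _ _ h)
    · exact h

lemma pvCl_mem (l : List (Int × Int)) : ∀ r : PySem.Set Int, ∀ x ∈ l.foldl pvClStep r,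
    x ∈ r ∨ ∃ e ∈ l, x = e.1 ∨ x = e.2 := by
  induction l with
  | nil => intro r x hx; exact Or.inl (by simpa using hx)
  | cons e l ih =>
    intro r x hx
    simp only [List.foldl_cons] at hx
    rcases ih _ x hx with hx1 | ⟨e1, he1, hx1⟩
    · simp only [pvClStep] at hx1
      split_ifs at hx1 with hc
      · rcases (PySem.Set.mem_add _ _ _).1 hx1 with hx2 | rfl
        · rcases (PySem.Set.mem_add _ _ _).1 hx2 with hx3 | rfl
          · exact Or.inl hx3
          · exact Or.inr ⟨e, by simp⟩
        · exact Or.inr ⟨e, by simp⟩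
      · exact Or.inl hx1
    · exact Or.inr ⟨e1, List.mem_cons_of_mem _ he1, hx1⟩

lemma pvCl_sound (es : List (Int × Int)) (s : Int) (l : List (Int × Int))
    (hl : ∀ e ∈ l, e ∈ es) : ∀ r : PySem.Set Int, (∀ x ∈ r, pvConn es s x) →
    ∀ x ∈ l.foldl pvClStep r, pvConn es s x := by
  induction l with
  | nil => intro r h x hx; exact h x (by simpa using hx)
  | cons e l ih =>
    intro r h x hx
    simp only [List.foldl_cons] at hx
    refine ih (fun e1 he1 => hl e1 (List.mem_cons_of_mem _ he1)) _ ?_ x hx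
    intro y hy
    simp only [pvClStep] at hy
    split_ifs at hy with hc
    · have hes : (e.1, e.2) ∈ es := hl e (by simp)
      have hconn1 : pvConn es s e.1 ∧ pvConn es s e.2 := by
        rcases hc with hc | hc
        · exact ⟨h e.1 hc, (h e.1 hc).tail (Or.inl hes)⟩
        · exact ⟨(h e.2 hc).tail (Or.inr hes), h e.2 hc⟩
      rcases (PySem.Set.mem_add _ _ _).1 hy with hy1 | rfl
      · rcases (PySem.Set.mem_add _ _ _).1 hy1 with hy2 | rfl
        · exact h y hy2
        · exact hconn1.1
      · exact hconn1.2
    · exact h y hy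

lemma pvCl_fix (l : List (Int × Int)) : ∀ r : PySem.Set Int,
    l.foldl pvClStep r = r → ∀ e ∈ l, (e.1 ∈ r ∨ e.2 ∈ r) → e.1 ∈ r ∧ e.2 ∈ r := by
  induction l with
  | nil => intro r _ e he; exact absurd he (by simp)
  | cons e l ih =>
    intro r hfix e1 he1
    simp only [List.foldl_cons] at hfix
    have hstep : pvClStep r e = r := by
      obtain ⟨t1, ht1⟩ : ∃ t, pvClStep r e = r ++ t := by
        simp only [pvClStep]
        split_ifs with hc
        · obtain ⟨ta, hta⟩ := pvAdd_append r e.1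
          obtain ⟨tb, htb⟩ := pvAdd_append (PySem.Set.add r e.1) e.2
          exact ⟨ta ++ tb, by rw [htb, hta, List.append_assoc]⟩
        · exact ⟨[], by simp⟩
      obtain ⟨t2, ht2⟩ := pvCl_append l (pvClStep r e)
      have hidr : r ++ (t1 ++ t2) = r := by
        rw [← List.append_assoc, ← ht1, ← ht2, hfix]
      have ht1nil : t1 = [] := by
        have hl2 := congrArg List.length hidr
        simp at hl2
        simp [hl2.1]
      rw [ht1, ht1nil, List.append_nil]
    intro hcond
    rcases List.mem_cons.1 he1 with rfl | he2
    · -- the head edge: its relaxation did nothing, so both endpoints were present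
      by_cases hc : e1.1 ∈ r ∨ e1.2 ∈ r
      · have hadd : PySem.Set.add (PySem.Set.add r e1.1) e1.2 = r := by
          simpa only [pvClStep, if_pos hc] using hstep
        have h1 : e1.1 ∈ r := by
          by_contra h1
          have hlen := congrArg List.length hadd
          rw [PySem.Set.add_of_not_mem h1] at hlen
          obtain ⟨t, ht⟩ := pvAdd_append (r ++ [e1.1]) e1.2
          rw [ht] at hlen
          simp at hlen
        have h2 : e1.2 ∈ r := by
          by_contra h2
          rw [PySem.Set.add_of_mem h1] at hadd
          have hlen := congrArg List.length hadd
          rw [PySem.Set.add_of_not_mem h2] at hlen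
          simp at hlen
        exact ⟨h1, h2⟩
      · exact absurd hcond hc
    · exact ih r (by rw [hstep] at hfix; exact hfix) e1 he2 hcond

-- six relaxation rounds: either a round is a fixpoint (then the set is closed) or
-- each of the six rounds strictly grew the set
lemma pvRounds_sub (es : List (Int × Int)) (k : Nat) (r : PySem.Set Int) :
    ∀ x ∈ r, x ∈ (List.range k).foldl (fun r _ => es.foldl pvClStep r) r := by
  induction k with
  | zero => simpa using fun x hx => hx
  | succ k ih =>
    rw [List.range_succ, List.foldl_append]
    intro x hx
    exact pvCl_sub es _ x (ih x hx)

lemma pvRounds_closure (es : List (Int × Int)) (s : Int) (hs : s ∈ PySem.Set.ofList (pvEnds es))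
    (hcard : (PySem.Set.ofList (pvEnds es)).length = 7) :
    (∀ x ∈ (List.range 6).foldl (fun r _ => es.foldl pvClStep r) [s], pvConn es s x) ∧
    (∀ x ∈ (List.range 6).foldl (fun r _ => es.foldl pvClStep r) [s],
      x ∈ PySem.Set.ofList (pvEnds es)) ∧
    ((List.range 6).foldl (fun r _ => es.foldl pvClStep r) [s]).Nodup ∧
    ((∀ v ∈ PySem.Set.ofList (pvEnds es), pvConn es s v) →
      ∀ v ∈ PySem.Set.ofList (pvEnds es),
        v ∈ (List.range 6).foldl (fun r _ => es.foldl pvClStep r) [s]) := by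
  have hNnd : (PySem.Set.ofList (pvEnds es)).Nodup := PySem.Set.nodup_ofList _
  have hsound : ∀ k, ∀ x ∈ (List.range k).foldl (fun r _ => es.foldl pvClStep r) [s],
      pvConn es s x := by
    intro k
    induction k with
    | zero => intro x hx; simp at hx; subst hx; exact .refl
    | succ k ih =>
      rw [List.range_succ, List.foldl_append]
      simp only [List.foldl_cons, List.foldl_nil]
      exact pvCl_sound es s es (fun e he => he) _ ih
  have hsub : ∀ k, ∀ x ∈ (List.range k).foldl (fun r _ => es.foldl pvClStep r) [s],
      x ∈ PySem.Set.ofList (pvEnds es) := by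
    intro k
    induction k with
    | zero => intro x hx; simp at hx; subst hx; exact hs
    | succ k ih =>
      rw [List.range_succ, List.foldl_append]
      simp only [List.foldl_cons, List.foldl_nil]
      intro x hx
      rcases pvCl_mem es _ x hx with hx1 | ⟨e, he, hx1⟩
      · exact ih x hx1
      · refine (PySem.Set.mem_ofList _ _).2 ?_
        rcases hx1 with rfl | rfl
        · exact (mem_pvEnds_of_pvAdj (Or.inl he)).1
        · exact (mem_pvEnds_of_pvAdj (Or.inl he)).2
  have hnd : ∀ k, ((List.range k).foldl (fun r _ => es.foldl pvClStep r) [s]).Nodup := by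
    intro k
    induction k with
    | zero => simp
    | succ k ih =>
      rw [List.range_succ, List.foldl_append]
      simp only [List.foldl_cons, List.foldl_nil]
      exact pvCl_nodup es _ ih
  refine ⟨hsound 6, hsub 6, hnd 6, ?_⟩
  intro hconn
  by_cases hfix : ∃ j < 6, es.foldl pvClStep
      ((List.range j).foldl (fun r _ => es.foldl pvClStep r) [s])
      = (List.range j).foldl (fun r _ => es.foldl pvClStep r) [s]
  · obtain ⟨j, hj6, hj⟩ := hfix
    set Rj := (List.range j).foldl (fun r _ => es.foldl pvClStep r) [s] with hRj
    have hclosed := pvCl_fix es Rj hj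
    have hreach : ∀ v, pvConn es s v → v ∈ Rj := by
      intro v hv
      induction hv with
      | refl => exact pvRounds_sub es j [s] s (by simp)
      | tail h step ih =>
        rename_i b c
        rcases step with hstep | hstep
        · exact (hclosed (b, c) hstep (Or.inl ih)).2
        · exact (hclosed (c, b) hstep (Or.inr ih)).1
    have hstay : ∀ m, (List.range (j + m)).foldl (fun r _ => es.foldl pvClStep r) [s] = Rj := by
      intro m
      induction m with
      | zero => rfl
      | succ m ih =>
        rw [show j + (m + 1) = (j + m) + 1 by omega, List.range_succ, List.foldl_append]
        simp only [List.foldl_cons, List.foldl_nil]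
        rw [ih, hj]
    intro v hv
    have hR6 : (List.range 6).foldl (fun r _ => es.foldl pvClStep r) [s] = Rj := by
      have hm := hstay (6 - j)
      rwa [show j + (6 - j) = 6 by omega] at hm
    rw [hR6]
    exact hreach v (hconn v hv)
  · push_neg at hfix
    have hgrow : ∀ k, k ≤ 6 → 1 + k ≤
        ((List.range k).foldl (fun r _ => es.foldl pvClStep r) [s]).length := by
      intro k
      induction k with
      | zero => simp
      | succ k ih =>
        intro hk6
        rw [List.range_succ, List.foldl_append]
        simp only [List.foldl_cons, List.foldl_nil]
        set Rk := (List.range k).foldl (fun r _ => es.foldl pvClStep r) [s] with hRk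
        obtain ⟨t, ht⟩ := pvCl_append es Rk
        have hne2 : es.foldl pvClStep Rk ≠ Rk := hfix k (by omega)
        have htne : t ≠ [] := by
          rintro rfl
          exact hne2 (by rw [ht, List.append_nil])
        have htlen : 1 ≤ t.length := by
          cases t with
          | nil => exact absurd rfl htne
          | cons a t => simp
        have hk := ih (by omega)
        rw [ht]
        simp only [List.length_append]
        omega
    have h7 : 7 ≤ ((List.range 6).foldl (fun r _ => es.foldl pvClStep r) [s]).length :=
      hgrow 6 (by omega)
    intro v hv
    exact pvSubsetEq (hnd 6) hNnd (hsub 6) (by omega) v hv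

-- ---------- the two degree checks agree ----------

lemma pvDict_size (d : PySem.Dict Int Int) : d.size = d.keys.length := by
  simp [PySem.Dict.size, PySem.Dict.keys]

lemma pvDeg_keys (es : List (Int × Int)) :
    ((pvEnds es).foldl (fun d x => d.insert x (d.getD x 0 + 1))
      (PySem.Dict.empty : PySem.Dict Int Int)).keys = PySem.Set.ofList (pvEnds es) := by
  rw [PySem.Dict.keys_foldl_insert]
  rw [PySem.Dict.keys_empty]
  exact PySem.Set.update_nil_left _

lemma pvDeg_getD (es : List (Int × Int)) (x : Int) :
    ((pvEnds es).foldl (fun d x => d.insert x (d.getD x 0 + 1))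
      (PySem.Dict.empty : PySem.Dict Int Int)).getD x 0 = ((pvEnds es).count x : Int) := by
  rw [PySem.Dict.getD_foldl_insert_add_one]
  simp

lemma pvDegree_checks (es : List (Int × Int)) :
    ((pvGraphNodes es).1.keys.any (fun k => 4 < ((pvGraphNodes es).1.getD k []).length))
    = (((pvEnds es).foldl (fun d x => d.insert x (d.getD x 0 + 1))
        (PySem.Dict.empty : PySem.Dict Int Int)).values.any (fun c => decide (4 < c))) := by
  rw [Bool.eq_iff_iff, List.any_eq_true, List.any_eq_true]
  have hvals : ((pvEnds es).foldl (fun d x => d.insert x (d.getD x 0 + 1))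
      (PySem.Dict.empty : PySem.Dict Int Int)).values
      = (PySem.Set.ofList (pvEnds es)).map
          (fun k => ((pvEnds es).count k : Int)) := by
    rw [PySem.Dict.values_eq_map_keys _ (by rw [pvDeg_keys]; exact PySem.Set.nodup_ofList _) 0,
      pvDeg_keys]
    exact List.map_congr_left (fun k _ => pvDeg_getD es k)
  rw [hvals, pvGraphNodes_keys]
  constructor
  · rintro ⟨k, hk, hdeg⟩
    refine ⟨((pvEnds es).count k : Int), List.mem_map.2 ⟨k, hk, rfl⟩, ?_⟩
    rw [pvGraphNodes_getD, pvNbrs_length] at hdeg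
    simp at hdeg ⊢
    omega
  · rintro ⟨c, hc, hdeg⟩
    obtain ⟨k, hk, rfl⟩ := List.mem_map.1 hc
    refine ⟨k, hk, ?_⟩
    rw [pvGraphNodes_getD, pvNbrs_length]
    simp at hdeg ⊢
    omega

-- ---------- assembling the equivalence ----------

lemma pvNs_headI_eq (es : List (Int × Int)) (hne : es ≠ []) :
    (PySem.Set.ofList (pvEnds es)).headI = es.headI.1 := by
  cases es with
  | nil => exact absurd rfl hne
  | cons e es => rw [pvNs_headI]; rfl

lemma pvClStep_eq : (fun (r : PySem.Set Int) (e : Int × Int) =>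
    if e.1 ∈ r ∨ e.2 ∈ r then PySem.Set.add (PySem.Set.add r e.1) e.2 else r) = pvClStep := rfl

lemma pvMainEq (es : List (Int × Int)) :
    is_tree_with_max_4_children es = is_tree_with_max_4_children_alt es := by
  by_cases h0 : es = []
  · subst h0; rfl
  have hg := pvGraphNodes_getD es
  have hsnd := pvGraphNodes_snd es
  have hnsne : PySem.Set.ofList (pvEnds es) ≠ [] := by
    cases es with
    | nil => exact absurd rfl h0
    | cons e es => exact pvNs_ne_nil e es
  have hsmem : (PySem.Set.ofList (pvEnds es)).headI ∈ PySem.Set.ofList (pvEnds es) :=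
    pvHeadI_mem hnsne
  simp only [is_tree_with_max_4_children, is_tree_with_max_4_children_alt]
  rw [if_neg h0, hsnd, pvDegFold es, pvClStep_eq, pvDict_size, pvDeg_keys,
    pvDegree_checks es, ← pvNs_headI_eq es h0]
  by_cases h7 : (PySem.Set.ofList (pvEnds es)).length = 7
  · rw [if_neg (by omega : ¬(PySem.Set.ofList (pvEnds es)).length ≠ 7),
      if_neg (by omega : ¬(PySem.Set.ofList (pvEnds es)).length ≠ 7)]
    by_cases h6 : es.length = 6
    · rw [if_neg (by omega : ¬es.length ≠ 6)]
      by_cases hconn : is_connected es = true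
      · -- the Φ case: connected, 7 nodes, 6 edges
        have hconn' := (is_connected_iff es h0).1 hconn
        have φ : PvPhi es (PySem.Set.ofList (pvEnds es)).headI :=
          ⟨h6, h7, hconn', hsmem⟩
        rw [hconn]
        rw [if_neg (by simp : ¬(¬true = true))]
        rw [show (2 * es.length + 1) = 13 by omega] at *
        have hcyc := has_cycle_false es _ φ
        rw [show (2 * es.length + 1) = 13 by omega] at hcyc
        rw [hcyc]
        rw [if_neg (by simp : ¬(false = true))]
        rw [if_neg (by
          rw [h6, h7]
          norm_num : ¬((es.length : Int) ≠ ((PySem.Set.ofList (pvEnds es)).length : Int) - 1))]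
        obtain ⟨c1, c2, c3, c4⟩ := pvRounds_closure es _ hsmem h7
        have hR7 : ((List.range 6).foldl (fun r _ => es.foldl pvClStep r)
            [(PySem.Set.ofList (pvEnds es)).headI]).length = 7 := by
          have hsup := c4 hconn'
          exact Nat.le_antisymm (by have := pvLenLe c3 (PySem.Set.nodup_ofList _) c2; omega)
            (by have := pvLenLe (PySem.Set.nodup_ofList _) c3 hsup; omega)
        rw [show (PySem.Set.add PySem.Set.empty (PySem.Set.ofList (pvEnds es)).headI)
          = [(PySem.Set.ofList (pvEnds es)).headI] from rfl, hR7]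
        cases hdeg : ((pvGraphNodes es).1.keys.any
            (fun k => 4 < ((pvGraphNodes es).1.getD k []).length)) <;> simp
      · -- not connected: A fails its BFS check, B's closure cannot reach all 7 nodes
        have hconnf : is_connected es = false := by
          cases hc : is_connected es
          · rfl
          · exact absurd hc hconn
        rw [hconnf]
        rw [if_pos (by simp : ¬false = true)]
        have hconn' : ¬ (∀ v ∈ PySem.Set.ofList (pvEnds es),
            pvConn es (PySem.Set.ofList (pvEnds es)).headI v) :=
          fun h => hconn ((is_connected_iff es h0).2 h)
        obtain ⟨c1, c2, c3, c4⟩ := pvRounds_closure es _ hsmem h7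
        have hR7 : ((List.range 6).foldl (fun r _ => es.foldl pvClStep r)
            [(PySem.Set.ofList (pvEnds es)).headI]).length ≠ 7 := by
          intro hlen
          refine hconn' (fun v hv => c1 v ?_)
          exact pvSubsetEq c3 (PySem.Set.nodup_ofList _) c2 (by omega) v hv
        rw [show (PySem.Set.add PySem.Set.empty (PySem.Set.ofList (pvEnds es)).headI)
          = [(PySem.Set.ofList (pvEnds es)).headI] from rfl]
        cases hdeg : ((pvGraphNodes es).1.keys.any
            (fun k => 4 < ((pvGraphNodes es).1.getD k []).length)) <;>
          simp [hR7]
    · -- edge count ≠ 6: B rejects at once; A rejects at its edge-count test at the latest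
      rw [if_pos (by omega : es.length ≠ 6)]
      by_cases hconn : is_connected es = true
      · rw [hconn]
        rw [if_neg (by simp : ¬(¬true = true))]
        cases hcyc : (has_cycle (pvGraphNodes es).1 (PySem.Set.ofList (pvEnds es)).headI
            PySem.Set.empty none (2 * es.length + 1)).1
        · rw [if_neg (by simp : ¬(false = true))]
          rw [if_pos (by
            rw [h7]
            intro hcon
            norm_num at hcon
            omega : ((es.length : Int) ≠ ((PySem.Set.ofList (pvEnds es)).length : Int) - 1))]
        · rw [if_pos (by simp : (true = true))]
      · have hconnf : is_connected es = false := by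
          cases hc : is_connected es
          · rfl
          · exact absurd hc hconn
        rw [hconnf]
        rw [if_pos (by simp : ¬false = true)]
  · -- node count ≠ 7: both programs reject
    rw [if_pos (by omega : (PySem.Set.ofList (pvEnds es)).length ≠ 7)]
    by_cases h6 : es.length = 6
    · rw [if_neg (by omega : ¬es.length ≠ 6),
        if_pos (by omega : (PySem.Set.ofList (pvEnds es)).length ≠ 7)]
    · rw [if_pos (by omega : es.length ≠ 6)]

-- ===== VERDICT (by name: the statement is the Claim_ definition above) =====
theorem is_tree_with_max_4_children_spec : Claim_equal_is_tree_with_max_4_children := by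
  intro edge_list _
  exact pvMainEq edge_list
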